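-- pv_equiv track=rewrite | github.com/abhishekpujala776-byte/V0-digital-footprint-analyzer | scripts/ai_recommendation_engine.py | _assess_data_sensitivity
-- ===== SOURCE A (Python) =====
-- from typing import Dict, List, Any, Tuple
--
-- def _assess_data_sensitivity(breach_data: List[Dict]) -> Dict[str, bool]:
--     """Assess what types of sensitive data were compromised"""
--     compromised_types = set()
--     for breach in breach_data:
--         compromised_types.update(breach.get('data_types', []))
--
--     return {
--         'financial_data': any(dt in compromised_types for dt in ['credit_card', 'bank_account', 'ssn']),
--         'authentication_data': any(dt in compromised_types for dt in ['password', 'security_question']),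
--         'personal_identifiers': any(dt in compromised_types for dt in ['ssn', 'passport', 'drivers_license']),
--         'contact_information': any(dt in compromised_types for dt in ['email', 'phone', 'address'])
--     }
-- ===== SOURCE B (Python) =====
-- from typing import Dict, List
--
-- def _assess_data_sensitivity(breach_data: List[Dict]) -> Dict[str, bool]:
--     """Single data-driven pass: classify each compromised type directly, no set, no category scans."""
--     financial = authentication = personal = contact = False
--     for breach in breach_data:
--         for dt in breach.get('data_types', []):
--             if dt in ('credit_card', 'bank_account'):
--                 financial = True
--             elif dt == 'ssn':
--                 financial = personal = True
--             elif dt in ('password', 'security_question'):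
--                 authentication = True
--             elif dt in ('passport', 'drivers_license'):
--                 personal = True
--             elif dt in ('email', 'phone', 'address'):
--                 contact = True
--     return {
--         'financial_data': financial,
--         'authentication_data': authentication,
--         'personal_identifiers': personal,
--         'contact_information': contact,
--     }
-- ===== Notes on version B (the rewrite author's own statement) =====
-- stated objective: simpler
-- what changed: Instead of accumulating a set of all compromised types and then running four category-membership scans, B makes one pass driven by the data types themselves, classifying each type into its category flags directly.
import Mathlib
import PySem

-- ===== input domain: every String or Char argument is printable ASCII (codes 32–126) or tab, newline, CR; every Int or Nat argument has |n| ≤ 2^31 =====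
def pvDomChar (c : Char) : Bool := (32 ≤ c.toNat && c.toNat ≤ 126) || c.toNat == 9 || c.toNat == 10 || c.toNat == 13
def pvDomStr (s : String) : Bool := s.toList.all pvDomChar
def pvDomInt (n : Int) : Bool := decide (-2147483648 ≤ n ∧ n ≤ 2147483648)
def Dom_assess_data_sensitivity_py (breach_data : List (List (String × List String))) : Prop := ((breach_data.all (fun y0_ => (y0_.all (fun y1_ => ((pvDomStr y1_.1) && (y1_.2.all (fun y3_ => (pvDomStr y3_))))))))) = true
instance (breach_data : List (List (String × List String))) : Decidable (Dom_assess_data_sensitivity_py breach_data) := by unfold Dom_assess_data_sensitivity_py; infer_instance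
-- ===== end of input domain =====

-- B changes the algorithm: one pass over the data types setting category flags directly (no set, no category scans); return value only.
-- ===== PORT A =====
def assess_data_sensitivity_py (breach_data : List (List (String × List String))) : List (String × Bool) :=
  let compromised := breach_data.foldl
    (fun s b => PySem.Set.update s (PySem.Dict.getD (PySem.Dict.mk b) "data_types" []))
    (PySem.Set.empty : PySem.Set String)
  [("financial_data", (["credit_card", "bank_account", "ssn"] : List String).any (fun dt => PySem.Set.contains compromised dt)),
   ("authentication_data", (["password", "security_question"] : List String).any (fun dt => PySem.Set.contains compromised dt)),
   ("personal_identifiers", (["ssn", "passport", "drivers_license"] : List String).any (fun dt => PySem.Set.contains compromised dt)),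
   ("contact_information", (["email", "phone", "address"] : List String).any (fun dt => PySem.Set.contains compromised dt))]

-- ===== PORT B =====
def pvBStep (fl : Bool × Bool × Bool × Bool) (dt : String) : Bool × Bool × Bool × Bool :=
  if dt = "credit_card" ∨ dt = "bank_account" then (true, fl.2.1, fl.2.2.1, fl.2.2.2)
  else if dt = "ssn" then (true, fl.2.1, true, fl.2.2.2)
  else if dt = "password" ∨ dt = "security_question" then (fl.1, true, fl.2.2.1, fl.2.2.2)
  else if dt = "passport" ∨ dt = "drivers_license" then (fl.1, fl.2.1, true, fl.2.2.2)
  else if dt = "email" ∨ dt = "phone" ∨ dt = "address" then (fl.1, fl.2.1, fl.2.2.1, true)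
  else fl

def assess_data_sensitivity_py_alt (breach_data : List (List (String × List String))) : List (String × Bool) :=
  let fl := breach_data.foldl
    (fun fl b => (PySem.Dict.getD (PySem.Dict.mk b) "data_types" []).foldl pvBStep fl)
    ((false, false, false, false) : Bool × Bool × Bool × Bool)
  [("financial_data", fl.1), ("authentication_data", fl.2.1),
   ("personal_identifiers", fl.2.2.1), ("contact_information", fl.2.2.2)]
-- ===== PRECONDITION & SPEC =====
def Spec_assess_data_sensitivity_py (breach_data : List (List (String × List String))) (out : List (String × Bool)) : Prop := out = assess_data_sensitivity_py_alt breach_data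
instance (breach_data : List (List (String × List String))) (out : List (String × Bool)) : Decidable (Spec_assess_data_sensitivity_py breach_data out) := by unfold Spec_assess_data_sensitivity_py; infer_instance

-- ===== CLAIM (what is proved, stated in full; the proofs are below) =====
def Claim_equal_assess_data_sensitivity_py : Prop := ∀ (breach_data : List (List (String × List String))), Dom_assess_data_sensitivity_py breach_data → Spec_assess_data_sensitivity_py breach_data (assess_data_sensitivity_py breach_data)


-- ===== LEMMAS AND PROOFS =====
def pvTypes (breach_data : List (List (String × List String))) : List String :=
  breach_data.flatMap (fun b => PySem.Dict.getD (PySem.Dict.mk b) "data_types" [])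

theorem pvSetFold (breach_data : List (List (String × List String))) (s : PySem.Set String) :
    breach_data.foldl
      (fun s b => PySem.Set.update s (PySem.Dict.getD (PySem.Dict.mk b) "data_types" [])) s
    = PySem.Set.update s (pvTypes breach_data) := by
  induction breach_data generalizing s with
  | nil => simp [pvTypes, PySem.Set.update_nil]
  | cons b bd ih => simp [pvTypes, List.foldl_cons, ih, PySem.Set.update_append]

theorem pvBFoldFlat (breach_data : List (List (String × List String)))
    (fl : Bool × Bool × Bool × Bool) :
    breach_data.foldl
      (fun fl b => (PySem.Dict.getD (PySem.Dict.mk b) "data_types" []).foldl pvBStep fl) fl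
    = (pvTypes breach_data).foldl pvBStep fl := by
  induction breach_data generalizing fl with
  | nil => simp [pvTypes]
  | cons b bd ih => simp [pvTypes, List.foldl_cons, ih, List.foldl_append]

def pvFinB (dt : String) : Bool := dt == "credit_card" || dt == "bank_account" || dt == "ssn"
def pvAuthB (dt : String) : Bool := dt == "password" || dt == "security_question"
def pvPersB (dt : String) : Bool := dt == "ssn" || dt == "passport" || dt == "drivers_license"
def pvContB (dt : String) : Bool := dt == "email" || dt == "phone" || dt == "address"

theorem pvBFoldChar (l : List String) (f a p c : Bool) :
    l.foldl pvBStep (f, a, p, c)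
    = (f || l.any pvFinB, a || l.any pvAuthB, p || l.any pvPersB, c || l.any pvContB) := by
  induction l generalizing f a p c with
  | nil => simp
  | cons x l ih =>
    simp only [List.foldl_cons, List.any_cons, pvBStep]
    split_ifs with h1 h2 h3 h4 h5
    · rcases h1 with h | h <;> subst h <;> simp [ih, pvFinB, pvAuthB, pvPersB, pvContB]
    · subst h2; simp [ih, pvFinB, pvAuthB, pvPersB, pvContB]
    · rcases h3 with h | h <;> subst h <;> simp [ih, pvFinB, pvAuthB, pvPersB, pvContB]
    · rcases h4 with h | h <;> subst h <;> simp [ih, pvFinB, pvAuthB, pvPersB, pvContB]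
    · rcases h5 with h | h | h <;> subst h <;> simp [ih, pvFinB, pvAuthB, pvPersB, pvContB]
    · push Not at h1 h3 h4 h5
      simp [ih, pvFinB, pvAuthB, pvPersB, pvContB,
        beq_eq_false_iff_ne.mpr h1.1, beq_eq_false_iff_ne.mpr h1.2, beq_eq_false_iff_ne.mpr h2,
        beq_eq_false_iff_ne.mpr h3.1, beq_eq_false_iff_ne.mpr h3.2,
        beq_eq_false_iff_ne.mpr h4.1, beq_eq_false_iff_ne.mpr h4.2,
        beq_eq_false_iff_ne.mpr h5.1, beq_eq_false_iff_ne.mpr h5.2.1, beq_eq_false_iff_ne.mpr h5.2.2]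

theorem pvFlagEq (l : List String) (cats : List String) (P : String → Bool)
    (hP : ∀ x, P x = true ↔ x ∈ cats) :
    cats.any (fun dt => PySem.Set.contains (PySem.Set.update PySem.Set.empty l) dt)
    = l.any P := by
  apply Bool.eq_iff_iff.mpr
  simp only [List.any_eq_true, PySem.Set.contains_eq_listContains, List.contains_iff_mem,
    PySem.Set.mem_update, hP]
  constructor
  · rintro ⟨dt, hdt, hmem | hmem⟩
    · simp [PySem.Set.empty] at hmem
    · exact ⟨dt, hmem, hdt⟩
  · rintro ⟨x, hx, hcat⟩
    exact ⟨x, hcat, Or.inr hx⟩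

-- ===== VERDICT (by name: the statement is the Claim_ definition above) =====
theorem assess_data_sensitivity_py_spec : Claim_equal_assess_data_sensitivity_py := by
  intro bd _
  show _ = _
  unfold assess_data_sensitivity_py assess_data_sensitivity_py_alt
  rw [pvSetFold, pvBFoldFlat, pvBFoldChar]
  simp only [Bool.false_or]
  refine congrArg₂ _ (congrArg _ ?_) (congrArg₂ _ (congrArg _ ?_)
    (congrArg₂ _ (congrArg _ ?_) (congrArg₂ _ (congrArg _ ?_) rfl))) <;>
    apply pvFlagEq <;> intro x <;>
    simp [pvFinB, pvAuthB, pvPersB, pvContB] <;> tauto
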